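-- pv_equiv track=rewrite | github.com/brumaire18/chart_trainer | ui_streamlit.py | _apply_bulk_group_assignments
-- ===== SOURCE A (Python) =====
-- from typing import Callable, Dict, List, Optional, Tuple
--
-- def _apply_bulk_group_assignments(
--     custom_groups: Dict[str, List[str]],
--     assignments: List[Tuple[str, List[str]]],
--     symbols: List[str],
-- ) -> Tuple[Dict[str, List[str]], int, int, List[str]]:
--     updated = {group: [str(code).zfill(4) for code in codes] for group, codes in custom_groups.items()}
--     available = {str(symbol).zfill(4) for symbol in symbols}
--     applied_count = 0
--     created_group_count = 0
--     unknown_symbols: List[str] = []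
--
--     for code, groups in assignments:
--         if code not in available:
--             unknown_symbols.append(code)
--             continue
--         for group in groups:
--             if group not in updated:
--                 updated[group] = []
--                 created_group_count += 1
--             if code not in updated[group]:
--                 updated[group].append(code)
--                 applied_count += 1
--     return updated, applied_count, created_group_count, sorted(set(unknown_symbols))
-- ===== SOURCE B (Python) =====
-- def _apply_bulk_group_assignments(custom_groups, assignments, symbols):
--     available = {str(symbol).zfill(4) for symbol in symbols}
--     base = {group: [str(code).zfill(4) for code in codes] for group, codes in custom_groups.items()}
--     unknown = sorted({code for code, _ in assignments if code not in available})
--     pairs = []        # the additions as (group, code), in application order, no duplicates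
--     new_groups = []   # groups to create, in first-reference order
--     for code, groups in assignments:
--         if code in available:
--             for group in groups:
--                 if group not in base and group not in new_groups:
--                     new_groups.append(group)
--                 if (group, code) not in pairs and code not in base.get(group, []):
--                     pairs.append((group, code))
--     items = [(g, v + [c for gg, c in pairs if gg == g]) for g, v in base.items()]
--     items += [(g, [c for gg, c in pairs if gg == g]) for g in new_groups]
--     return dict(items), len(pairs), len(new_groups), unknown
-- ===== Notes on version B (the rewrite author's own statement) =====
-- stated objective: alternative
-- what changed: B does not thread a mutable group->codes dict through the loop: it records additions as a flat duplicate-free (group, code) log plus a list of newly created groups, computes the unknown symbols by a separate comprehension, and assembles the result dict from base + log in one final pass; counts are just the lengths of the log and the new-group list.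
import Mathlib
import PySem

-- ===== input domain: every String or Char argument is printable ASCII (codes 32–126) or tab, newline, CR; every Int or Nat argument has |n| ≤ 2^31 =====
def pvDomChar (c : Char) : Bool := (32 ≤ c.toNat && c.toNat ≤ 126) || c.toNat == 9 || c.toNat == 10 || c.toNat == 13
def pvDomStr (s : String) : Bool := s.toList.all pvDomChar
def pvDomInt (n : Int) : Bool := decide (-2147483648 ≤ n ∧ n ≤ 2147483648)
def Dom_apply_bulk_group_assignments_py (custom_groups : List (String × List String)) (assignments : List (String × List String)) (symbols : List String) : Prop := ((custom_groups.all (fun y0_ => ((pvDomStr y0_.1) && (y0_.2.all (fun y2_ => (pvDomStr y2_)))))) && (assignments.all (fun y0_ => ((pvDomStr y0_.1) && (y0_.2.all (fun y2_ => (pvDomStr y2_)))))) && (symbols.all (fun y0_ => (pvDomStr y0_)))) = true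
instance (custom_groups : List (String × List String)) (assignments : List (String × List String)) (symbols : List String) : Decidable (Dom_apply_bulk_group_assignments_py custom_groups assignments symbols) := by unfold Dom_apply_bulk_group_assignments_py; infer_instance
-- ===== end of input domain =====

-- B keeps no mutable group->codes dict in the loop: it records additions as a flat duplicate-free
-- (group, code) log plus a list of newly created groups, and assembles the result dict at the end
-- (objective: alternative decomposition; no speed claim).

-- ===== PORT A =====
-- shared by both ports (the same comprehensions open both Pythons):
def pvZ (s : String) : String := PySem.Str.zfill s 4

def pvBase (custom_groups : List (String × List String)) : PySem.Dict String (List String) :=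
  custom_groups.foldl (fun d p => d.insert p.1 (p.2.map pvZ)) PySem.Dict.empty

def pvAvail (symbols : List String) : PySem.Set String :=
  PySem.Set.ofList (symbols.map pvZ)

-- A's inner loop body ('for group in groups: …')
def pvAStepG (code : String) (st : PySem.Dict String (List String) × Int × Int) (group : String) :
    PySem.Dict String (List String) × Int × Int :=
  let u := if st.1.contains group then st.1 else st.1.insert group []
  let cre := if st.1.contains group then st.2.2 else st.2.2 + 1
  if (u.getD group []).contains code then (u, st.2.1, cre)
  else (u.insert group ((u.getD group []) ++ [code]), st.2.1 + 1, cre)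

-- A's outer loop body ('for code, groups in assignments: …')
def pvAStep (available : PySem.Set String)
    (st : PySem.Dict String (List String) × Int × Int × List String) (p : String × List String) :
    PySem.Dict String (List String) × Int × Int × List String :=
  if !(PySem.Set.contains available p.1) then (st.1, st.2.1, st.2.2.1, st.2.2.2 ++ [p.1])
  else
    let r := p.2.foldl (pvAStepG p.1) (st.1, st.2.1, st.2.2.1)
    (r.1, r.2.1, r.2.2, st.2.2.2)

def apply_bulk_group_assignments_py (custom_groups : List (String × List String)) (assignments : List (String × List String)) (symbols : List String) : (List (String × List String)) × Int × Int × List String :=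
  let available := pvAvail symbols
  let st := assignments.foldl (pvAStep available) (pvBase custom_groups, 0, 0, ([] : List String))
  (st.1.items, st.2.1, st.2.2.1, PySem.List.sorted (PySem.Set.ofList st.2.2.2) (fun x => x) false)

-- ===== PORT B =====
-- B's inner loop body: extend the new-group list and the (group, code) log
def pvBStepG (base : PySem.Dict String (List String)) (code : String)
    (st : List (String × String) × List String) (group : String) :
    List (String × String) × List String :=
  let ng := if !(base.contains group) && !(st.2.contains group) then st.2 ++ [group] else st.2
  if !(st.1.contains (group, code)) && !((base.getD group []).contains code) then
    (st.1 ++ [(group, code)], ng)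
  else (st.1, ng)

-- '[c for gg, c in pairs if gg == g]'
def pvAdds (pairs : List (String × String)) (g : String) : List String :=
  (pairs.filter (fun r => r.1 == g)).map (fun r => r.2)

-- B's final assembly: base items extended by their additions, then the created groups
def pvItems (base : PySem.Dict String (List String)) (pairs : List (String × String)) (ng : List String) :
    List (String × List String) :=
  base.items.map (fun q => (q.1, q.2 ++ pvAdds pairs q.1)) ++ ng.map (fun g => (g, pvAdds pairs g))

def apply_bulk_group_assignments_py_alt (custom_groups : List (String × List String)) (assignments : List (String × List String)) (symbols : List String) : (List (String × List String)) × Int × Int × List String :=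
  let available := pvAvail symbols
  let base := pvBase custom_groups
  let unknown := PySem.List.sorted (PySem.Set.ofList
      ((assignments.filter (fun p => !(PySem.Set.contains available p.1))).map (fun p => p.1)))
      (fun x => x) false
  let st := assignments.foldl
      (fun st p => if PySem.Set.contains available p.1 then p.2.foldl (pvBStepG base p.1) st else st)
      (([] : List (String × String)), ([] : List String))
  ((PySem.Dict.ofList (pvItems base st.1 st.2)).items, (st.1.length : Int), (st.2.length : Int), unknown)

-- ===== PRECONDITION & SPEC =====
def Spec_apply_bulk_group_assignments_py (custom_groups : List (String × List String)) (assignments : List (String × List String)) (symbols : List String) (out : (List (String × List String)) × Int × Int × List String) : Prop := out = apply_bulk_group_assignments_py_alt custom_groups assignments symbols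
instance (custom_groups : List (String × List String)) (assignments : List (String × List String)) (symbols : List String) (out : (List (String × List String)) × Int × Int × List String) : Decidable (Spec_apply_bulk_group_assignments_py custom_groups assignments symbols out) := by unfold Spec_apply_bulk_group_assignments_py; infer_instance

-- ===== CLAIM (what is proved, stated in full; the proofs are below) =====
def Claim_equal_apply_bulk_group_assignments_py : Prop := ∀ (custom_groups : List (String × List String)) (assignments : List (String × List String)) (symbols : List String), Dom_apply_bulk_group_assignments_py custom_groups assignments symbols → Spec_apply_bulk_group_assignments_py custom_groups assignments symbols (apply_bulk_group_assignments_py custom_groups assignments symbols)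

-- ===== LEMMAS AND PROOFS =====

-- invariant of B's loop state
def pvW (base : PySem.Dict String (List String)) (pairs : List (String × String)) (ng : List String) : Prop :=
  ng.Nodup ∧ (∀ g ∈ ng, base.contains g = false) ∧
    (∀ r ∈ pairs, base.contains r.1 = true ∨ r.1 ∈ ng)

theorem pv_mem_adds (pairs : List (String × String)) (g c : String) :
    c ∈ pvAdds pairs g ↔ (g, c) ∈ pairs := by
  simp only [pvAdds, List.mem_map, List.mem_filter, beq_iff_eq]
  constructor
  · rintro ⟨⟨a, b⟩, ⟨hr, hab⟩, rfl⟩; subst hab; exact hr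
  · intro h; exact ⟨(g, c), ⟨h, rfl⟩, rfl⟩

theorem pv_adds_nil (base : PySem.Dict String (List String)) (pairs : List (String × String))
    (ng : List String) (g : String) (hW : pvW base pairs ng)
    (hb : base.contains g = false) (hn : g ∉ ng) : pvAdds pairs g = [] := by
  unfold pvAdds
  rw [List.filter_eq_nil_iff.mpr, List.map_nil]
  intro r hr hbe
  rcases hW.2.2 r hr with h | h
  · rw [beq_iff_eq] at hbe; rw [hbe] at h; rw [h] at hb; cases hb
  · rw [beq_iff_eq] at hbe; exact hn (hbe ▸ h)

theorem pv_contains_mk (base : PySem.Dict String (List String)) (pairs : List (String × String))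
    (ng : List String) (g : String) :
    (PySem.Dict.mk (pvItems base pairs ng)).contains g = (base.contains g || ng.contains g) := by
  simp only [pvItems, List.any_append, List.any_map, PySem.Dict.contains]
  simp [Function.comp_def]
  congr 1
  by_cases h : g ∈ ng
  · simp [h, List.any_eq_true]
  · simp [h]
    intro x hx e
    exact h (e ▸ hx)

theorem pv_get?_mk (base : PySem.Dict String (List String)) (pairs : List (String × String))
    (ng : List String) (g : String) :
    (PySem.Dict.mk (pvItems base pairs ng)).get? g =
      if base.contains g then some (base.getD g [] ++ pvAdds pairs g)
      else if ng.contains g then some (pvAdds pairs g) else none := by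
  simp only [PySem.Dict.get?, pvItems, List.find?_append, List.find?_map,
    Function.comp_def, PySem.Dict.contains, PySem.Dict.getD]
  cases hf : base.items.find? (fun q => q.1 == g) with
  | none =>
    have hany : (base.items.any fun p => p.1 == g) = false := by
      rw [List.any_eq_false]
      intro p hp
      exact List.find?_eq_none.mp hf p hp
    simp only [hany, Bool.false_eq_true, if_false, Option.map_none, Option.none_or]
    cases hn : ng.find? (fun x => x == g) with
    | none =>
      have hng : g ∉ ng := by
        intro hmem
        have := List.find?_eq_none.mp hn g hmem
        simp at this
      simp [hng]
    | some x =>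
      have hx : x = g := by have := List.find?_some hn; rwa [beq_iff_eq] at this
      have hmem : g ∈ ng := hx ▸ List.mem_of_find?_eq_some hn
      simp [hmem, hx]
  | some q =>
    have hq : q.1 = g := by have := List.find?_some hf; rwa [beq_iff_eq] at this
    have hany : (base.items.any fun p => p.1 == g) = true := by
      rw [List.any_eq_true]
      exact ⟨q, List.mem_of_find?_eq_some hf, by simp [hq]⟩
    simp [hany, hq]

theorem pv_getD_mk (base : PySem.Dict String (List String)) (pairs : List (String × String))
    (ng : List String) (g : String) (hW : pvW base pairs ng) :
    (PySem.Dict.mk (pvItems base pairs ng)).getD g [] =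
      (if base.contains g then base.getD g [] else []) ++ pvAdds pairs g := by
  rw [PySem.Dict.getD, pv_get?_mk]
  by_cases hb : base.contains g
  · simp [hb]
  · simp only [hb, Bool.false_eq_true, if_false]
    by_cases hn : g ∈ ng
    · simp [hn]
    · simp [hn, pv_adds_nil base pairs ng g hW (by simpa using hb) hn]

theorem pv_insert_fresh (base : PySem.Dict String (List String)) (pairs : List (String × String))
    (ng : List String) (g : String) (hW : pvW base pairs ng)
    (hb : base.contains g = false) (hn : g ∉ ng) :
    (PySem.Dict.mk (pvItems base pairs ng)).insert g [] =
      PySem.Dict.mk (pvItems base pairs (ng ++ [g])) := by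
  have hc : (PySem.Dict.mk (pvItems base pairs ng)).contains g = false := by
    rw [pv_contains_mk, hb]
    simpa using hn
  apply PySem.Dict.ext
  rw [PySem.Dict.items_insert_of_not_contains _ _ hc]
  simp [pvItems, pv_adds_nil base pairs ng g hW hb hn]

theorem pv_insert_existing (base : PySem.Dict String (List String)) (pairs : List (String × String))
    (ng : List String) (g c : String) (hnd : base.keys.Nodup) (hW : pvW base pairs ng)
    (hg : (base.contains g || ng.contains g) = true) :
    (PySem.Dict.mk (pvItems base pairs ng)).insert g
        ((PySem.Dict.mk (pvItems base pairs ng)).getD g [] ++ [c]) =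
      PySem.Dict.mk (pvItems base (pairs ++ [(g, c)]) ng) := by
  have hc : (PySem.Dict.mk (pvItems base pairs ng)).contains g = true := by
    rw [pv_contains_mk]; exact hg
  have hadds : ∀ x, pvAdds (pairs ++ [(g, c)]) x = pvAdds pairs x ++ (if g = x then [c] else []) := by
    intro x
    simp only [pvAdds, List.filter_append, List.map_append]
    congr 1
    by_cases hgx : g = x <;> simp [hgx]
  apply PySem.Dict.ext
  rw [PySem.Dict.items_insert_of_contains _ _ hc]
  show (pvItems base pairs ng).map _ = pvItems base (pairs ++ [(g, c)]) ng
  rw [pv_getD_mk base pairs ng g hW]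
  simp only [pvItems, List.map_append, List.map_map]
  congr 1
  · apply List.map_congr_left
    intro q hq
    by_cases hqg : q.1 = g
    · have hbc : base.contains g = true := by
        rw [PySem.Dict.contains, List.any_eq_true]
        exact ⟨q, hq, by simp [hqg]⟩
      have hbval : base.getD g [] = q.2 := by
        apply PySem.Dict.getD_of_mem_items base _ hnd
        rw [← hqg]
        exact hq
      simp [Function.comp_def, hqg, hbc, hbval, hadds]
    · simp [hqg, hadds, Ne.symm hqg]
  · apply List.map_congr_left
    intro x hx
    by_cases hxg : x = g
    · have hbf : base.contains g = false := hW.2.1 g (hxg ▸ hx)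
      simp [hxg, hbf, hadds]
    · simp [hxg, hadds, Ne.symm hxg]

theorem pv_stepG_sim_existing (base : PySem.Dict String (List String)) (c : String)
    (pairs : List (String × String)) (ng : List String) (g : String)
    (hnd : base.keys.Nodup) (hW : pvW base pairs ng)
    (hg : base.contains g = true ∨ g ∈ ng) :
    pvAStepG c (PySem.Dict.mk (pvItems base pairs ng), (pairs.length : Int), (ng.length : Int)) g =
      (PySem.Dict.mk (pvItems base (pvBStepG base c (pairs, ng) g).1 (pvBStepG base c (pairs, ng) g).2),
       ((pvBStepG base c (pairs, ng) g).1.length : Int), ((pvBStepG base c (pairs, ng) g).2.length : Int)) ∧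
      pvW base (pvBStepG base c (pairs, ng) g).1 (pvBStepG base c (pairs, ng) g).2 := by
  obtain ⟨hnodup, hngf, hpairs⟩ := hW
  have hWfull : pvW base pairs ng := ⟨hnodup, hngf, hpairs⟩
  have hbor : (base.contains g || ng.contains g) = true := by
    rcases hg with h | h
    · simp [h]
    · simp [h]
  have hcmk : (PySem.Dict.mk (pvItems base pairs ng)).contains g = true := by
    rw [pv_contains_mk]; exact hbor
  have hgd2 : (PySem.Dict.mk (pvItems base pairs ng)).getD g [] =
      base.getD g [] ++ pvAdds pairs g := by
    rw [pv_getD_mk base pairs ng g hWfull]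
    by_cases hb : base.contains g
    · simp [hb]
    · have hbf : base.contains g = false := by simpa using hb
      rw [PySem.Dict.getD_of_not_contains base [] hbf]
      simp [hbf]
  have hngprop : ¬(base.contains g = false ∧ ∀ x ∈ ng, ¬g = x) := by
    rcases hg with h | h
    · rintro ⟨h', -⟩; rw [h] at h'; cases h'
    · rintro ⟨-, h'⟩; exact h' g h rfl
  by_cases hP : (g, c) ∈ pairs ∨ c ∈ base.getD g []
  · -- the code is already present: both sides skip
    have hAany : (((PySem.Dict.mk (pvItems base pairs ng)).getD g []).any fun x => c == x) = true := by
      rw [hgd2, List.any_eq_true]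
      rcases hP with h | h
      · exact ⟨c, List.mem_append_right _ ((pv_mem_adds pairs g c).mpr h), by simp⟩
      · exact ⟨c, List.mem_append_left _ h, by simp⟩
    have hBfalse : ((!pairs.any fun x => (g, c) == x) &&
        !(base.getD g []).any fun x => c == x) = false := by
      rcases hP with h | h
      · have : (pairs.any fun x => (g, c) == x) = true := by
          rw [List.any_eq_true]; exact ⟨(g, c), h, by simp⟩
        simp [this]
      · have : ((base.getD g []).any fun x => c == x) = true := by
          rw [List.any_eq_true]; exact ⟨c, h, by simp⟩
        simp [this]
    constructor
    · unfold pvAStepG pvBStepG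
      simp only [List.contains_eq_any_beq, hcmk, if_true, hAany, hBfalse,
        Bool.false_eq_true, if_false]
      simp [hngprop]
    · unfold pvBStepG
      simp only [List.contains_eq_any_beq, hBfalse]
      simp [hngprop, hWfull]
  · push Not at hP
    obtain ⟨h1, h2⟩ := hP
    have hAany : (((PySem.Dict.mk (pvItems base pairs ng)).getD g []).any fun x => c == x) = false := by
      rw [hgd2, List.any_eq_false]
      intro x hx e
      rw [beq_iff_eq] at e
      subst e
      rcases List.mem_append.mp hx with h | h
      · exact h2 h
      · exact h1 ((pv_mem_adds pairs g c).mp h)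
    have hBtrue : ((!pairs.any fun x => (g, c) == x) &&
        !(base.getD g []).any fun x => c == x) = true := by
      have hp : (pairs.any fun x => (g, c) == x) = false := by
        rw [List.any_eq_false]
        intro p hp e
        rw [beq_iff_eq] at e
        exact h1 (e ▸ hp)
      have hb : ((base.getD g []).any fun x => c == x) = false := by
        rw [List.any_eq_false]
        intro x hx e
        rw [beq_iff_eq] at e
        exact h2 (e ▸ hx)
      simp [hp, hb]
    have hins : (PySem.Dict.mk (pvItems base pairs ng)).insert g
          ((PySem.Dict.mk (pvItems base pairs ng)).getD g [] ++ [c]) =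
        PySem.Dict.mk (pvItems base (pairs ++ [(g, c)]) ng) :=
      pv_insert_existing base pairs ng g c hnd hWfull hbor
    have hWfin : pvW base (pairs ++ [(g, c)]) ng := by
      refine ⟨hnodup, hngf, ?_⟩
      intro r hr
      rcases List.mem_append.mp hr with h | h
      · exact hpairs r h
      · simp at h
        subst h
        rcases hg with h' | h'
        · exact Or.inl h'
        · exact Or.inr h'
    constructor
    · unfold pvAStepG pvBStepG
      simp only [List.contains_eq_any_beq, hcmk, if_true, hAany, hBtrue,
        Bool.false_eq_true, if_false]
      simp [hngprop, hins]
    · unfold pvBStepG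
      simp only [List.contains_eq_any_beq, hBtrue]
      simp [hngprop, hWfin]

theorem pv_stepG_sim (base : PySem.Dict String (List String)) (c : String)
    (pairs : List (String × String)) (ng : List String) (g : String)
    (hnd : base.keys.Nodup) (hW : pvW base pairs ng) :
    pvAStepG c (PySem.Dict.mk (pvItems base pairs ng), (pairs.length : Int), (ng.length : Int)) g =
      (PySem.Dict.mk (pvItems base (pvBStepG base c (pairs, ng) g).1 (pvBStepG base c (pairs, ng) g).2),
       ((pvBStepG base c (pairs, ng) g).1.length : Int), ((pvBStepG base c (pairs, ng) g).2.length : Int)) ∧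
      pvW base (pvBStepG base c (pairs, ng) g).1 (pvBStepG base c (pairs, ng) g).2 := by
  obtain ⟨hnodup, hngf, hpairs⟩ := hW
  have hWfull : pvW base pairs ng := ⟨hnodup, hngf, hpairs⟩
  by_cases hb : base.contains g = true
  · -- the group already exists in base
    have hn : g ∉ ng := fun h => by rw [hngf g h] at hb; cases hb
    exact pv_stepG_sim_existing base c pairs ng g hnd hWfull (Or.inl hb)
  · by_cases hn : g ∈ ng
    · exact pv_stepG_sim_existing base c pairs ng g hnd hWfull (Or.inr hn)
    · -- fresh group
      have hbf : base.contains g = false := by simpa using hb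
      have hcmk : (PySem.Dict.mk (pvItems base pairs ng)).contains g = false := by
        rw [pv_contains_mk, hbf]; simpa using hn
      have hWext : pvW base pairs (ng ++ [g]) := by
        refine ⟨?_, ?_, ?_⟩
        · have hdisj : ng.Disjoint [g] := by
            intro a ha hb'
            simp at hb'
            exact hn (hb' ▸ ha)
          exact List.Nodup.append hnodup (List.nodup_singleton g) hdisj
        · intro x hx
          rcases List.mem_append.mp hx with h | h
          · exact hngf x h
          · simp at h; subst h; exact hbf
        · intro r hr
          rcases hpairs r hr with h | h
          · exact Or.inl h
          · exact Or.inr (List.mem_append_left [g] h)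
      have hadds0 : pvAdds pairs g = [] := pv_adds_nil base pairs ng g hWfull hbf hn
      have hu : (PySem.Dict.mk (pvItems base pairs ng)).insert g [] =
          PySem.Dict.mk (pvItems base pairs (ng ++ [g])) :=
        pv_insert_fresh base pairs ng g hWfull hbf hn
      have hgetD : (PySem.Dict.mk (pvItems base pairs (ng ++ [g]))).getD g [] = [] := by
        rw [pv_getD_mk base pairs (ng ++ [g]) g hWext, hbf]
        simp [hadds0]
      have hpairc : (g, c) ∉ pairs := by
        intro hmem
        rcases hpairs _ hmem with h | h
        · rw [h] at hbf; cases hbf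
        · exact hn h
      have hbgetD : base.getD g [] = [] := PySem.Dict.getD_of_not_contains base [] hbf
      have hins : (PySem.Dict.mk (pvItems base pairs (ng ++ [g]))).insert g
            ((PySem.Dict.mk (pvItems base pairs (ng ++ [g]))).getD g [] ++ [c]) =
          PySem.Dict.mk (pvItems base (pairs ++ [(g, c)]) (ng ++ [g])) :=
        pv_insert_existing base pairs (ng ++ [g]) g c hnd hWext (by simp)
      rw [hgetD] at hins
      have hWfin : pvW base (pairs ++ [(g, c)]) (ng ++ [g]) := by
        refine ⟨hWext.1, hWext.2.1, ?_⟩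
        intro r hr
        rcases List.mem_append.mp hr with h | h
        · rcases hpairs r h with h' | h'
          · exact Or.inl h'
          · exact Or.inr (List.mem_append_left [g] h')
        · simp at h; subst h; exact Or.inr (by simp)
      rw [List.nil_append] at hins
      have hpany : (pairs.any fun x => (g, c) == x) = false := by
        rw [List.any_eq_false]
        intro p hp e
        rw [beq_iff_eq] at e
        exact hpairc (e ▸ hp)
      have hngany : (ng.any fun x => g == x) = false := by
        rw [List.any_eq_false]
        intro x hx e
        rw [beq_iff_eq] at e
        exact hn (e ▸ hx)
      constructor
      · unfold pvAStepG pvBStepG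
        simp only [List.contains_eq_any_beq, hpany, hngany, hbf, Bool.not_false, Bool.and_self,
          if_true]
        simp [hcmk, hu, hgetD, hbgetD, hins]
      · unfold pvBStepG
        simp only [List.contains_eq_any_beq, hpany, hngany, hbf]
        simp [hbgetD, hWfin]

theorem pv_foldG_sim (base : PySem.Dict String (List String)) (c : String) (gs : List String)
    (hnd : base.keys.Nodup) :
    ∀ (pairs : List (String × String)) (ng : List String), pvW base pairs ng →
      gs.foldl (pvAStepG c) (PySem.Dict.mk (pvItems base pairs ng), (pairs.length : Int), (ng.length : Int)) =
        (PySem.Dict.mk (pvItems base (gs.foldl (pvBStepG base c) (pairs, ng)).1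
            (gs.foldl (pvBStepG base c) (pairs, ng)).2),
         ((gs.foldl (pvBStepG base c) (pairs, ng)).1.length : Int),
         ((gs.foldl (pvBStepG base c) (pairs, ng)).2.length : Int)) ∧
        pvW base (gs.foldl (pvBStepG base c) (pairs, ng)).1 (gs.foldl (pvBStepG base c) (pairs, ng)).2 := by
  induction gs with
  | nil => intro pairs ng hW; exact ⟨rfl, hW⟩
  | cons g gs ih =>
    intro pairs ng hW
    have h := pv_stepG_sim base c pairs ng g hnd hW
    simp only [List.foldl_cons, h.1]
    have := ih (pvBStepG base c (pairs, ng) g).1 (pvBStepG base c (pairs, ng) g).2 h.2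
    simpa using this

theorem pv_loop_sim (base : PySem.Dict String (List String)) (avail : PySem.Set String)
    (asg : List (String × List String)) (hnd : base.keys.Nodup) :
    ∀ (pairs : List (String × String)) (ng : List String) (unk : List String), pvW base pairs ng →
      asg.foldl (pvAStep avail)
          (PySem.Dict.mk (pvItems base pairs ng), (pairs.length : Int), (ng.length : Int), unk) =
        (PySem.Dict.mk (pvItems base
            (asg.foldl (fun st p => if PySem.Set.contains avail p.1 then p.2.foldl (pvBStepG base p.1) st else st) (pairs, ng)).1
            (asg.foldl (fun st p => if PySem.Set.contains avail p.1 then p.2.foldl (pvBStepG base p.1) st else st) (pairs, ng)).2),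
         ((asg.foldl (fun st p => if PySem.Set.contains avail p.1 then p.2.foldl (pvBStepG base p.1) st else st) (pairs, ng)).1.length : Int),
         ((asg.foldl (fun st p => if PySem.Set.contains avail p.1 then p.2.foldl (pvBStepG base p.1) st else st) (pairs, ng)).2.length : Int),
         unk ++ (asg.filter (fun p => !(PySem.Set.contains avail p.1))).map (fun p => p.1)) ∧
        pvW base
          (asg.foldl (fun st p => if PySem.Set.contains avail p.1 then p.2.foldl (pvBStepG base p.1) st else st) (pairs, ng)).1
          (asg.foldl (fun st p => if PySem.Set.contains avail p.1 then p.2.foldl (pvBStepG base p.1) st else st) (pairs, ng)).2 := by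
  induction asg with
  | nil =>
    intro pairs ng unk hW
    exact ⟨by simp, hW⟩
  | cons p asg ih =>
    intro pairs ng unk hW
    by_cases hav : PySem.Set.contains avail p.1 = true
    · have hG := pv_foldG_sim base p.1 p.2 hnd pairs ng hW
      have hstep : pvAStep avail
          (PySem.Dict.mk (pvItems base pairs ng), (pairs.length : Int), (ng.length : Int), unk) p =
          (PySem.Dict.mk (pvItems base (p.2.foldl (pvBStepG base p.1) (pairs, ng)).1
              (p.2.foldl (pvBStepG base p.1) (pairs, ng)).2),
           ((p.2.foldl (pvBStepG base p.1) (pairs, ng)).1.length : Int),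
           ((p.2.foldl (pvBStepG base p.1) (pairs, ng)).2.length : Int), unk) := by
        unfold pvAStep
        simp only [hav, Bool.not_true, Bool.false_eq_true, if_false, hG.1]
      have hih := ih (p.2.foldl (pvBStepG base p.1) (pairs, ng)).1
        (p.2.foldl (pvBStepG base p.1) (pairs, ng)).2 unk hG.2
      have hmem : p.1 ∈ avail := by simpa using hav
      constructor
      · rw [List.foldl_cons, hstep, hih.1]
        simp [hmem]
      · simpa [hmem] using hih.2
    · have havf : PySem.Set.contains avail p.1 = false := by simpa using hav
      have hnmem : p.1 ∉ avail := by simpa using havf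
      have hih := ih pairs ng (unk ++ [p.1]) hW
      constructor
      · rw [List.foldl_cons]
        have hstep : pvAStep avail
            (PySem.Dict.mk (pvItems base pairs ng), (pairs.length : Int), (ng.length : Int), unk) p =
            (PySem.Dict.mk (pvItems base pairs ng), (pairs.length : Int), (ng.length : Int),
             unk ++ [p.1]) := by
          unfold pvAStep
          simp [hnmem]
        rw [hstep, hih.1]
        simp [hnmem]
      · simpa [hnmem] using hih.2

theorem pv_nodup_base (custom_groups : List (String × List String)) :
    (pvBase custom_groups).keys.Nodup := by
  unfold pvBase
  exact PySem.Dict.nodup_keys_foldl_insert_key custom_groups (fun p => p.1)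
    (fun _ p => p.2.map pvZ) PySem.Dict.empty (by simp [PySem.Dict.keys, PySem.Dict.empty])

theorem pv_items_ofList (l : List (String × List String)) (h : (l.map (fun p => p.1)).Nodup) :
    (PySem.Dict.ofList l).items = l := by
  unfold PySem.Dict.ofList PySem.Dict.update
  rw [PySem.Dict.items_foldl_insert_fresh l (fun p => p.1) (fun p => p.2) PySem.Dict.empty
    (fun a _ => by simp [PySem.Dict.empty, PySem.Dict.contains]) h]
  simp [PySem.Dict.empty]

theorem pv_items_nil_nil (base : PySem.Dict String (List String)) :
    pvItems base [] [] = base.items := by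
  simp [pvItems, pvAdds]

-- ===== VERDICT (by name: the statement is the Claim_ definition above) =====
theorem apply_bulk_group_assignments_py_spec : Claim_equal_apply_bulk_group_assignments_py := by
  intro cg asg sym _
  unfold Spec_apply_bulk_group_assignments_py
  unfold apply_bulk_group_assignments_py apply_bulk_group_assignments_py_alt
  have hnd := pv_nodup_base cg
  have hW0 : pvW (pvBase cg) [] [] := by
    refine ⟨List.nodup_nil, ?_, ?_⟩ <;> intro r hr <;> simp at hr
  have h := pv_loop_sim (pvBase cg) (pvAvail sym) asg hnd [] [] [] hW0
  have e0 : (pvBase cg, (0 : Int), (0 : Int), ([] : List String)) =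
      (PySem.Dict.mk (pvItems (pvBase cg) [] []),
       ((([] : List (String × String)).length : Int)), ((([] : List String).length : Int)),
       ([] : List String)) := by
    rw [pv_items_nil_nil]
    simp
  dsimp only
  rw [e0, h.1]
  have hW := h.2
  have hkeys : ((pvItems (pvBase cg)
      (asg.foldl (fun st p => if PySem.Set.contains (pvAvail sym) p.1 then p.2.foldl (pvBStepG (pvBase cg) p.1) st else st) ([], [])).1
      (asg.foldl (fun st p => if PySem.Set.contains (pvAvail sym) p.1 then p.2.foldl (pvBStepG (pvBase cg) p.1) st else st) ([], [])).2).map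
        (fun p => p.1)).Nodup := by
    simp only [pvItems, List.map_append, List.map_map, Function.comp_def, List.map_id']
    refine List.Nodup.append ?_ hW.1 ?_
    · exact hnd
    · intro a ha hb
      rcases List.mem_map.mp ha with ⟨q, hq, hqa⟩
      have : (pvBase cg).contains a = true := by
        rw [PySem.Dict.contains, List.any_eq_true]
        exact ⟨q, hq, by simp [hqa]⟩
      rw [hW.2.1 a hb] at this
      cases this
  rw [pv_items_ofList _ hkeys]
  simp
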